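-- pv_equiv track=rewrite | github.com/Durgaprasad-kakarla/Geeks-for-Geeks | Difficulty: Easy/Largest number in one swap/largest-number-in-one-swap.py | largestSwap
-- ===== SOURCE A (Python) =====
-- def largestSwap(s):
--     #code here
--     n=len(s)
--     dic={}
--     for i in range(n):
--         dic[s[i]]=i
--     flag,lst=0,list(s)
--     for i in range(n):
--         curr=int(s[i])
--         for j in range(10,curr,-1):
--             if str(j) in dic and int(s[i])<j and i<dic[str(j)]:
--                 flag=1
--                 ind,i=dic[str(j)],i
--                 lst[i],lst[ind]=lst[ind],lst[i]
--                 break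
--         if flag==1:
--             break
--     return "".join(lst)
-- ===== SOURCE B (Python) =====
-- def largestSwap(s):
--     # One right-to-left pass records, for each i, the max digit of s[i+1:] with its
--     # rightmost index; one left-to-right pass does the single improving swap.
--     n = len(s)
--     suf = [None] * n          # suf[i] = (max digit value of s[i+1:], its rightmost index), or None
--     best = None
--     for i in range(n - 1, -1, -1):
--         suf[i] = best
--         if s[i].isdigit():
--             v = int(s[i])
--             if best is None or v > best[0]:
--                 best = (v, i)
--     for i in range(n):
--         cur = int(s[i])
--         e = suf[i]
--         if e is not None and cur < e[0]:
--             j = e[1]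
--             lst = list(s)
--             lst[i], lst[j] = lst[j], lst[i]
--             return "".join(lst)
--     return s
-- ===== Notes on version B (the rewrite author's own statement) =====
-- stated objective: faster
-- what changed: Replaces A's digit->last-index dict plus a nested count-down-over-digits scan at every position by a single right-to-left pass building a suffix-maximum table (max digit of the suffix with its rightmost index) followed by one left-to-right pass that swaps at the first improvable position.
import Mathlib
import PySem

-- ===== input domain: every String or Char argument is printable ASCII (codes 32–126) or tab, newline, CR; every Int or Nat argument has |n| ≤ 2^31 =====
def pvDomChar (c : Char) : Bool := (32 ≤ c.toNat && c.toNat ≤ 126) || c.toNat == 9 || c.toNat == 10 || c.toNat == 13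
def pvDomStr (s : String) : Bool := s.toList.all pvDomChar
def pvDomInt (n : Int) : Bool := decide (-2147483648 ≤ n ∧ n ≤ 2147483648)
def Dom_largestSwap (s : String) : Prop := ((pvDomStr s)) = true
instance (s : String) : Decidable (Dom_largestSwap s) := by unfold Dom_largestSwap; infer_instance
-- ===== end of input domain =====

-- B replaces A's digit->last-index dict and per-position count-down-over-digits scan by a
-- suffix-maximum table built in one right-to-left pass, then one left-to-right pass swaps.

-- ===== PORT A =====
-- dic[s[i]] = i for i in range(n)  (keys are the 1-character strings s[i], modelled as List Char)
def aDic (cs : List Char) : PySem.Dict (List Char) Int :=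
  (PySem.List.pyRange 0 cs.length 1).foldl
    (fun d i => d.insert [PySem.List.pyGetD cs i ' '] i) PySem.Dict.empty

-- inner loop 'for j in range(10, curr, -1): if str(j) in dic and int(s[i])<j and i<dic[str(j)]: … break'
def aInner (dic : PySem.Dict (List Char) Int) (i curr : Int) : List Int → Option Int
  | [] => none
  | j :: js =>
    match dic.get? (PySem.Int.toStr j).toList with
    | some ind => if curr < j ∧ i < ind then some ind else aInner dic i curr js
    | none => aInner dic i curr js

-- outer loop 'for i in range(n): …' with the flag/break pattern (= return on first swap)
def aOuter (dic : PySem.Dict (List Char) Int) (cs lst : List Char) : List Int → List Char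
  | [] => lst
  | i :: is =>
    match PySem.Int.ofChars? [PySem.List.pyGetD cs i ' '] with
    | none => lst   -- here Python's int(s[i]) raises ValueError; Pre_ excludes such inputs
    | some curr =>
      match aInner dic i curr (PySem.List.pyRange 10 curr (-1)) with
      | some ind =>
          PySem.List.pySetD (PySem.List.pySetD lst i (PySem.List.pyGetD lst ind ' ')) ind
            (PySem.List.pyGetD lst i ' ')
      | none => aOuter dic cs lst is

def largestSwap (s : String) : String :=
  String.ofList
    (aOuter (aDic s.toList) s.toList s.toList (PySem.List.pyRange 0 s.toList.length 1))

-- ===== PORT B =====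
-- c.isdigit() for the printable-ASCII domain
def isDig (c : Char) : Bool := '0' ≤ c && c ≤ '9'

-- right-to-left pass: returns (best digit of cs as (value, absolute rightmost index), suffix
-- table: entry for position pos+k is the best of the part strictly after pos+k)
def bScan (pos : Nat) : List Char → Option (Int × Nat) × List (Option (Int × Nat))
  | [] => (none, [])
  | c :: rest =>
    let r := bScan (pos + 1) rest
    let best :=
      if isDig c then
        match PySem.Int.ofChars? [c] with
        | some v =>
          (match r.1 with
           | none => some (v, pos)
           | some (d, j) => if d < v then some (v, pos) else some (d, j))
        | none => r.1   -- unreachable: isDig c guarantees int(s[i]) parses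
      else r.1
    (best, r.1 :: r.2)

-- left-to-right pass: first position whose suffix maximum beats it, with that maximum's index
def bFind (i : Nat) : List Char → List (Option (Int × Nat)) → Option (Nat × Nat)
  | c :: cs, e :: tab =>
    (match PySem.Int.ofChars? [c] with
     | none => none   -- here Python's int(s[i]) raises ValueError; Pre_ excludes such inputs
     | some cur =>
       match e with
       | some (d, j) => if cur < d then some (i, j) else bFind (i + 1) cs tab
       | none => bFind (i + 1) cs tab)
  | _, _ => none

def largestSwap_alt (s : String) : String :=
  match bFind 0 s.toList (bScan 0 s.toList).2 with
  | some (i, j) =>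
      String.ofList ((s.toList.set i (s.toList.getD j ' ')).set j (s.toList.getD i ' '))
  | none => s

-- ===== PRECONDITION & SPEC =====
-- Pre_ is exactly the return domain of A (and of B): every position holds a digit, except that
-- positions at or after the first non-digit one are unconstrained when some earlier position can
-- be improved by a later digit (then the swap returns before int(s[i]) reaches the non-digit
-- and raises ValueError).
def Pre_largestSwap (s : String) : Prop :=
  ((List.range s.toList.length).all (fun b =>
    isDig (s.toList.getD b ' ') ||
    (List.range b).any (fun p =>
      (List.range s.toList.length).any (fun q =>
        decide (p < q) && isDig (s.toList.getD q ' ') &&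
          decide (s.toList.getD p ' ' < s.toList.getD q ' '))))) = true
instance (s : String) : Decidable (Pre_largestSwap s) := by unfold Pre_largestSwap; infer_instance
def pvWitness_largestSwap : String := "192"
def Spec_largestSwap (s : String) (out : String) : Prop := out = largestSwap_alt s
instance (s : String) (out : String) : Decidable (Spec_largestSwap s out) := by unfold Spec_largestSwap; infer_instance

-- ===== CLAIM (what is proved, stated in full; the proofs are below) =====
def Claim_equal_largestSwap : Prop := ∀ (s : String), Dom_largestSwap s → Pre_largestSwap s → Spec_largestSwap s (largestSwap s)

-- ===== LEMMAS AND PROOFS =====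

/-- digit value of a digit character -/
def digv (c : Char) : Int := (c.toNat : Int) - 48

/-- reference: (maximum digit character, its rightmost index) of a list, `none` if no digit -/
def lastMaxD : List Char → Option (Char × Nat)
  | [] => none
  | c :: t =>
    match lastMaxD t, isDig c with
    | none, true => some (c, 0)
    | none, false => none
    | some (d, k), true => if d < c then some (c, 0) else some (d, k + 1)
    | some (d, k), false => some (d, k + 1)

/-- reference: rightmost index of a character in a list -/
def lastIdx? : List Char → Char → Option Nat
  | [], _ => none
  | c :: t, x =>
    match lastIdx? t x with
    | some k => some (k + 1)
    | none => if c = x then some 0 else none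

-- ---------- digit characters ----------

lemma isDig_iff {c : Char} : isDig c = true ↔ '0' ≤ c ∧ c ≤ '9' := by
  simp [isDig]

lemma digit_ofChars {c : Char} (h0 : '0' ≤ c) (h9 : c ≤ '9') :
    PySem.Int.ofChars? [c] = some (digv c) ∧ 0 ≤ digv c ∧ digv c ≤ 9 := by
  have h3 : Char.ofNat c.toNat = c := Char.ofNat_toNat c
  have h1 : 48 ≤ c.toNat := h0
  have h2 : c.toNat ≤ 57 := h9
  set n := c.toNat with hn
  rw [← h3]
  interval_cases n <;> refine ⟨by decide, by decide, by decide⟩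

lemma digv_bounds {c : Char} (h0 : '0' ≤ c) (h9 : c ≤ '9') : 0 ≤ digv c ∧ digv c ≤ 9 := by
  have h1 : 48 ≤ c.toNat := h0
  have h2 : c.toNat ≤ 57 := h9
  simp only [digv]; omega

lemma digv_char {c : Char} (h0 : '0' ≤ c) (_h9 : c ≤ '9') :
    Char.ofNat (48 + (digv c).toNat) = c := by
  have h1 : 48 ≤ c.toNat := h0
  have heq : 48 + (digv c).toNat = c.toNat := by simp only [digv]; omega
  rw [heq, Char.ofNat_toNat]

lemma toStr_digit (j : Int) (h1 : 0 < j) (h2 : j ≤ 9) :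
    (PySem.Int.toStr j).toList = [Char.ofNat (48 + j.toNat)] := by
  interval_cases j <;> decide

lemma toStr_ten : (PySem.Int.toStr 10).toList = ['1', '0'] := by decide

lemma digv_ofNat (j : Int) (h1 : 0 ≤ j) (h2 : j ≤ 9) :
    digv (Char.ofNat (48 + j.toNat)) = j ∧
    '0' ≤ Char.ofNat (48 + j.toNat) ∧ Char.ofNat (48 + j.toNat) ≤ '9' := by
  interval_cases j <;> exact ⟨by decide, by decide, by decide⟩

lemma digit_lt_iff {c d : Char} (hc0 : '0' ≤ c) (hd0 : '0' ≤ d) :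
    (c < d ↔ digv c < digv d) := by
  have h1 : c < d ↔ c.toNat < d.toNat := Iff.rfl
  have h2 : 48 ≤ c.toNat := hc0
  have h3 : 48 ≤ d.toNat := hd0
  simp only [h1, digv]
  omega

lemma digv_inj {c d : Char} (hc0 : '0' ≤ c) (hc9 : c ≤ '9') (hd0 : '0' ≤ d) (hd9 : d ≤ '9')
    (h : digv c = digv d) : c = d := by
  rw [← digv_char hc0 hc9, ← digv_char hd0 hd9, h]

-- ---------- lastIdx? ----------

lemma lastIdx?_none_iff (xs : List Char) (y : Char) : lastIdx? xs y = none ↔ y ∉ xs := by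
  induction xs with
  | nil => simp [lastIdx?]
  | cons c t ih =>
      simp only [lastIdx?, List.mem_cons]
      rcases h : lastIdx? t y with _ | k
      · by_cases hcy : c = y
        · simp [hcy]
        · simp only [if_neg hcy, true_iff, not_or]
          exact ⟨fun h' => hcy h'.symm, ih.mp h⟩
      · have hyt : y ∈ t := by
          by_contra hy
          rw [ih.mpr hy] at h; cases h
        simp [hyt]

lemma lastIdx?_some_of_mem {xs : List Char} {y : Char} (h : y ∈ xs) :
    ∃ k, lastIdx? xs y = some k := by
  rcases he : lastIdx? xs y with _ | k
  · exact absurd ((lastIdx?_none_iff xs y).mp he) (not_not_intro h)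
  · exact ⟨k, rfl⟩

lemma lastIdx?_getD {xs : List Char} {y : Char} {k : Nat} (h : lastIdx? xs y = some k) :
    k < xs.length ∧ xs.getD k ' ' = y := by
  induction xs generalizing k with
  | nil => cases h
  | cons c t ih =>
      simp only [lastIdx?] at h
      rcases he : lastIdx? t y with _ | k'
      · rw [he] at h
        by_cases hcy : c = y
        · rw [if_pos hcy] at h
          obtain rfl : (0 : Nat) = k := by simpa using h
          simp [hcy]
        · rw [if_neg hcy] at h; cases h
      · rw [he] at h
        obtain rfl : k' + 1 = k := by simpa using h
        obtain ⟨h1, h2⟩ := ih he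
        exact ⟨by simp; omega, by simpa using h2⟩

lemma lastIdx?_append (u v : List Char) (y : Char) :
    lastIdx? (u ++ v) y =
      if y ∈ v then (lastIdx? v y).map (· + u.length) else lastIdx? u y := by
  induction u with
  | nil =>
      by_cases h : y ∈ v
      · obtain ⟨k, hk⟩ := lastIdx?_some_of_mem h
        simp [h, hk]
      · rw [List.nil_append, if_neg h]
        simp [lastIdx?, (lastIdx?_none_iff v y).mpr h]
  | cons c t ih =>
      by_cases h : y ∈ v
      · obtain ⟨k, hk⟩ := lastIdx?_some_of_mem h
        have hmem : y ∈ t ++ v := List.mem_append_right t h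
        obtain ⟨k', hk'⟩ := lastIdx?_some_of_mem hmem
        simp only [List.cons_append, lastIdx?, hk']
        rw [ih, if_pos h, hk] at hk'
        simp only [Option.map_some, Option.some.injEq] at hk'
        simp only [if_pos h, hk, Option.map_some, Option.some.injEq, List.length_cons]
        omega
      · simp only [List.cons_append, lastIdx?, ih, if_neg h]

lemma lastIdx?_append_singleton (xs : List Char) (x y : Char) :
    lastIdx? (xs ++ [x]) y = if y = x then some xs.length else lastIdx? xs y := by
  rw [lastIdx?_append]
  by_cases h : y = x
  · simp [h, lastIdx?]
  · simp [h]

lemma lastIdx?_drop {cs : List Char} {m : Nat} {y : Char} (h : y ∈ cs.drop m) :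
    lastIdx? cs y = (lastIdx? (cs.drop m) y).map (· + m) := by
  have hm : m ≤ cs.length := by
    by_contra hm
    rw [List.drop_eq_nil_of_le (by omega)] at h
    cases h
  have hsplit := lastIdx?_append (cs.take m) (cs.drop m) y
  rw [List.take_append_drop] at hsplit
  rw [hsplit, if_pos h, List.length_take, Nat.min_eq_left hm]

lemma getD_mem_drop {cs : List Char} {m k : Nat} (h1 : m ≤ k) (h2 : k < cs.length) :
    cs.getD k ' ' ∈ cs.drop m := by
  have hk : k - m < (cs.drop m).length := by simp; omega
  have heq : (cs.drop m)[k - m]'hk = cs[k]'h2 := by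
    have hmk := Nat.add_sub_cancel' h1
    simp [List.getElem_drop, hmk]
  rw [List.getD_eq_getElem cs ' ' h2, ← heq]
  exact List.getElem_mem hk

-- ---------- aDic characterisation ----------

lemma aDic_eq_foldl (cs : List Char) :
    aDic cs = (PySem.List.enumerate cs 0).foldl (fun d p => d.insert [p.2] p.1) PySem.Dict.empty := by
  rw [aDic, PySem.List.enumerate_eq_map_pyRange cs ' ', List.foldl_map]
  simp [PySem.List.len]

lemma aDic_get?_singleton (cs : List Char) (y : Char) :
    (aDic cs).get? [y] = (lastIdx? cs y).map (fun k => (k : Int)) := by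
  rw [aDic_eq_foldl]
  induction cs using List.reverseRecOn with
  | nil => simp [lastIdx?, PySem.List.enumerate_nil]
  | append_singleton xs x ih =>
      rw [PySem.List.enumerate_append, List.foldl_append, lastIdx?_append_singleton]
      simp only [PySem.List.enumerate_cons, PySem.List.enumerate_nil, List.foldl_cons, List.foldl_nil]
      by_cases h : y = x
      · subst h
        rw [PySem.Dict.get?_insert_self]
        simp
      · rw [PySem.Dict.get?_insert_of_ne _ _ (by simpa using h), ih]
        simp [h]

lemma aDic_get?_pair (cs : List Char) (a b : Char) : (aDic cs).get? [a, b] = none := by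
  rw [aDic_eq_foldl]
  induction cs using List.reverseRecOn with
  | nil => simp
  | append_singleton xs x ih =>
      rw [PySem.List.enumerate_append, List.foldl_append]
      simp only [PySem.List.enumerate_cons, PySem.List.enumerate_nil, List.foldl_cons, List.foldl_nil]
      rw [PySem.Dict.get?_insert_of_ne _ _ (by simp), ih]

-- ---------- lastMaxD characterisation ----------

lemma lastMaxD_none_iff (t : List Char) : lastMaxD t = none ↔ ∀ x ∈ t, ¬ isDig x = true := by
  induction t with
  | nil => simp [lastMaxD]
  | cons c r ih =>
      rcases hr : lastMaxD r with _ | ⟨d, k⟩ <;> by_cases hc : isDig c <;>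
          simp only [lastMaxD, hr, hc]
      · constructor
        · intro h; cases h
        · intro hall; exact absurd hc (hall c (List.mem_cons_self))
      · constructor
        · intro _ x hx
          rcases List.mem_cons.mp hx with rfl | hx
          · exact hc
          · exact ih.mp hr x hx
        · intro _; trivial
      · constructor
        · intro h; split_ifs at h
        · intro hall
          have h0 : lastMaxD r = none := ih.mpr (fun x hx => hall x (List.mem_cons_of_mem c hx))
          rw [hr] at h0
          cases h0
      · constructor
        · intro h; cases h
        · intro hall
          have h0 : lastMaxD r = none := ih.mpr (fun x hx => hall x (List.mem_cons_of_mem c hx))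
          rw [hr] at h0
          cases h0

lemma lastMaxD_spec {t : List Char} {d : Char} {k : Nat} (h : lastMaxD t = some (d, k)) :
    k < t.length ∧ t.getD k ' ' = d ∧ isDig d = true ∧
      (∀ x ∈ t, isDig x = true → x ≤ d) ∧
      ∀ m, k < m → m < t.length → isDig (t.getD m ' ') = true → t.getD m ' ' < d := by
  induction t generalizing d k with
  | nil => cases h
  | cons c r ih =>
      have hcons : ∀ m : Nat, 0 < m → (c :: r).getD m ' ' = r.getD (m - 1) ' ' := by
        intro m hm
        cases m with
        | zero => omega
        | succ m' => simp
      rcases hr : lastMaxD r with _ | ⟨d', k'⟩ <;> by_cases hc : isDig c <;>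
          simp only [lastMaxD, hr, hc] at h
      · simp only [Option.some.injEq, Prod.mk.injEq] at h
        obtain ⟨rfl, rfl⟩ := h
        refine ⟨by simp, by simp, hc, ?_, ?_⟩
        · intro x hx hxd
          rcases List.mem_cons.mp hx with rfl | hx
          · exact le_refl x
          · exact absurd hxd ((lastMaxD_none_iff r).mp hr x hx)
        · intro m hm1 hm2 hmd
          exfalso
          have hmem : r.getD (m - 1) ' ' ∈ r := by
            have hmr : m - 1 < r.length := by simp at hm2; omega
            rw [List.getD_eq_getElem r ' ' hmr]
            exact List.getElem_mem hmr
          rw [hcons m hm1] at hmd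
          exact (lastMaxD_none_iff r).mp hr _ hmem hmd
      · cases h
      · obtain ⟨h1, h2, h3, h4, h5⟩ := ih hr
        by_cases hdc : d' < c
        · rw [if_pos hdc] at h
          simp only [Option.some.injEq, Prod.mk.injEq] at h
          obtain ⟨rfl, rfl⟩ := h
          refine ⟨by simp, by simp, hc, ?_, ?_⟩
          · intro x hx hxd
            rcases List.mem_cons.mp hx with rfl | hx
            · exact le_refl x
            · exact le_of_lt (lt_of_le_of_lt (h4 x hx hxd) hdc)
          · intro m hm1 hm2 hmd
            rw [hcons m hm1] at hmd ⊢
            have hmr : m - 1 < r.length := by simp at hm2; omega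
            have hle : r.getD (m - 1) ' ' ≤ d' := by
              refine h4 _ ?_ hmd
              rw [List.getD_eq_getElem r ' ' hmr]
              exact List.getElem_mem hmr
            exact lt_of_le_of_lt hle hdc
        · rw [if_neg hdc] at h
          simp only [Option.some.injEq, Prod.mk.injEq] at h
          obtain ⟨rfl, rfl⟩ := h
          refine ⟨by simp; omega, by simpa using h2, h3, ?_, ?_⟩
          · intro x hx hxd
            rcases List.mem_cons.mp hx with rfl | hx
            · exact le_of_not_gt hdc
            · exact h4 x hx hxd
          · intro m hm1 hm2 hmd
            rw [hcons m (by omega)] at hmd ⊢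
            exact h5 (m - 1) (by omega) (by simp at hm2; omega) hmd
      · simp only [Option.some.injEq, Prod.mk.injEq] at h
        obtain ⟨h1, h2, h3, h4, h5⟩ := ih hr
        obtain ⟨rfl, rfl⟩ := h
        refine ⟨by simp; omega, by simpa using h2, h3, ?_, ?_⟩
        · intro x hx hxd
          rcases List.mem_cons.mp hx with rfl | hx
          · exact absurd hxd hc
          · exact h4 x hx hxd
        · intro m hm1 hm2 hmd
          rw [hcons m (by omega)] at hmd ⊢
          exact h5 (m - 1) (by omega) (by simp at hm2; omega) hmd

lemma lastMaxD_lastIdx {t : List Char} {d : Char} {k : Nat} (h : lastMaxD t = some (d, k)) :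
    lastIdx? t d = some k := by
  induction t generalizing d k with
  | nil => cases h
  | cons c r ih =>
      rcases hr : lastMaxD r with _ | ⟨d', k'⟩ <;> by_cases hc : isDig c <;>
          simp only [lastMaxD, hr, hc] at h
      · simp only [Option.some.injEq, Prod.mk.injEq] at h
        obtain ⟨rfl, rfl⟩ := h
        have hnot : c ∉ r := by
          intro hm
          exact (lastMaxD_none_iff r).mp hr c hm hc
        simp [lastIdx?, (lastIdx?_none_iff r c).mpr hnot]
      · cases h
      · by_cases hdc : d' < c
        · rw [if_pos hdc] at h
          simp only [Option.some.injEq, Prod.mk.injEq] at h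
          obtain ⟨rfl, rfl⟩ := h
          have hnot : c ∉ r := by
            intro hm
            exact absurd (lt_of_le_of_lt ((lastMaxD_spec hr).2.2.2.1 c hm hc) hdc) (lt_irrefl c)
          simp [lastIdx?, (lastIdx?_none_iff r c).mpr hnot]
        · rw [if_neg hdc] at h
          simp only [Option.some.injEq, Prod.mk.injEq] at h
          obtain ⟨rfl, rfl⟩ := h
          simp [lastIdx?, ih hr]
      · simp only [Option.some.injEq, Prod.mk.injEq] at h
        obtain ⟨rfl, rfl⟩ := h
        simp [lastIdx?, ih hr]

-- ---------- bScan characterisation ----------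

lemma bScan_fst (p : Nat) (t : List Char) :
    (bScan p t).1 = (lastMaxD t).map (fun q => (digv q.1, p + q.2)) := by
  induction t generalizing p with
  | nil => simp [bScan, lastMaxD]
  | cons c r ih =>
      rcases hr : lastMaxD r with _ | ⟨d, k⟩ <;> by_cases hc : isDig c <;>
          simp only [bScan, lastMaxD, hr, hc, ih (p + 1)]
      · have hcd := isDig_iff.mp hc
        simp [(digit_ofChars hcd.1 hcd.2).1]
      · simp
      · have hcd := isDig_iff.mp hc
        have hdd := isDig_iff.mp (lastMaxD_spec hr).2.2.1
        rw [(digit_ofChars hcd.1 hcd.2).1]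
        by_cases hdc : d < c
        · rw [if_pos hdc]
          simp only [Option.map_some]
          rw [if_pos ((digit_lt_iff hdd.1 hcd.1).mp hdc)]
          simp
        · rw [if_neg hdc]
          simp only [Option.map_some]
          rw [if_neg (fun h => hdc ((digit_lt_iff hdd.1 hcd.1).mpr h))]
          simp
          omega
      · simp
        omega

lemma bScan_snd_cons (p : Nat) (c : Char) (r : List Char) :
    (bScan p (c :: r)).2 = (bScan (p + 1) r).1 :: (bScan (p + 1) r).2 := rfl

-- ---------- the inner loop ----------

lemma aInner_step (cs : List Char) (i : Nat) (_hi : i < cs.length)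
    (hcd0 : '0' ≤ cs.getD i ' ') (hcd9 : cs.getD i ' ' ≤ '9') :
    ∀ (m : Nat), digv (cs.getD i ' ') + m ≤ 10 →
    (∀ j : Int, digv (cs.getD i ' ') + m < j → j ≤ 9 →
        Char.ofNat (48 + j.toNat) ∉ cs.drop (i + 1)) →
    aInner (aDic cs) (i : Int) (digv (cs.getD i ' '))
        (PySem.List.pyRange (digv (cs.getD i ' ') + m) (digv (cs.getD i ' ')) (-1)) =
      (match lastMaxD (cs.drop (i + 1)) with
       | some (d, k) => if cs.getD i ' ' < d then some ((i + 1 + k : Nat) : Int) else none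
       | none => none) := by
  set c := cs.getD i ' ' with hcdef
  have hcb := digv_bounds hcd0 hcd9
  intro m
  induction m with
  | zero =>
      intro _ hnone
      rw [PySem.List.pyRange_neg_one_eq_nil (by omega)]
      rcases hlm : lastMaxD (cs.drop (i + 1)) with _ | ⟨d, k⟩
      · rfl
      · simp only [aInner]
        obtain ⟨hk1, hk2, hkd, -, -⟩ := lastMaxD_spec hlm
        have hdmem : d ∈ cs.drop (i + 1) := by
          rw [← hk2]
          rw [List.getD_eq_getElem _ ' ' hk1]
          exact List.getElem_mem hk1
        have hd := isDig_iff.mp hkd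
        by_cases hcd : c < d
        · exfalso
          refine hnone (digv d) ?_ (digv_bounds hd.1 hd.2).2 ?_
          · have := (digit_lt_iff hcd0 hd.1).mp hcd
            omega
          · rw [digv_char hd.1 hd.2]
            exact hdmem
        · rw [if_neg hcd]
  | succ m ihm =>
      intro hle hnone
      have hgt : digv c < digv c + (m + 1 : Nat) := by push_cast; omega
      rw [PySem.List.pyRange_neg_one_cons (by omega)]
      simp only [aInner]
      have hsub : digv c + (m + 1 : Nat) - 1 = digv c + (m : Nat) := by push_cast; ring
      by_cases h10 : digv c + ((m : Nat) + 1 : Nat) = 10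
      · -- j = 10: key "10" is never in the dict
        have h10' : digv c + ((m : Int) + 1) = 10 := by push_cast at h10; omega
        rw [show (digv c + ((m + 1 : Nat) : Int)) = 10 by push_cast; omega]
        rw [toStr_ten, aDic_get?_pair]
        rw [show (10 : Int) - 1 = digv c + (m : Nat) by omega]
        exact ihm (by omega) (by intro j h1 h2; exact absurd h2 (by omega))
      · -- 1 ≤ j ≤ 9
        have hj9 : digv c + ((m : Nat) + 1) ≤ 9 := by push_cast at hle h10 ⊢; omega
        have hj1 : 0 < digv c + ((m : Nat) + 1) := by omega
        set j : Int := digv c + ((m + 1 : Nat) : Int) with hjdef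
        have hjj : j = digv c + ((m : Nat) + 1) := by push_cast [hjdef]; ring
        rw [toStr_digit j (by omega) (by omega)]
        set e := Char.ofNat (48 + j.toNat) with hedef
        obtain ⟨hde, he0, he9⟩ := digv_ofNat j (by omega) (by omega)
        rw [← hedef] at hde he0 he9
        rw [aDic_get?_singleton]
        rcases hli : lastIdx? cs e with _ | k0
        · -- e not in the string at all
          show aInner (aDic cs) (↑i) (digv c) (PySem.List.pyRange (j - 1) (digv c) (-1)) = _
          rw [hsub]
          refine ihm (by omega) ?_
          intro j' h1 h2
          by_cases hj' : j' = j
          · subst hj'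
            intro hmem
            exact (lastIdx?_none_iff cs e).mp hli (List.mem_of_mem_drop hmem)
          · refine hnone j' (by omega) h2
        · show (if digv c < j ∧ (i : Int) < ((k0 : Nat) : Int) then some ((k0 : Nat) : Int)
                 else aInner (aDic cs) (↑i) (digv c) (PySem.List.pyRange (j - 1) (digv c) (-1))) = _
          have hik := lastIdx?_getD hli
          by_cases hik0 : (i : Int) < (k0 : Int)
          · -- hit: this is the swap index
            rw [if_pos ⟨by omega, hik0⟩]
            -- e occurs in the suffix
            have hk0i : i + 1 ≤ k0 := by omega
            have hemem : e ∈ cs.drop (i + 1) := by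
              rw [← hik.2]
              exact getD_mem_drop hk0i hik.1
            rcases hlm : lastMaxD (cs.drop (i + 1)) with _ | ⟨d, k⟩
            · exact absurd (isDig_iff.mpr ⟨he0, he9⟩) ((lastMaxD_none_iff _).mp hlm e hemem)
            · obtain ⟨hk1, hk2, hkd, hmax, -⟩ := lastMaxD_spec hlm
              have hdmem : d ∈ cs.drop (i + 1) := by
                rw [← hk2]
                rw [List.getD_eq_getElem _ ' ' hk1]
                exact List.getElem_mem hk1
              have hd := isDig_iff.mp hkd
              -- d ≤ e by the no-bigger-digit hypothesis, e ≤ d by maximality, so d = e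
              have hde2 : digv d ≤ j := by
                by_contra hgt'
                exact hnone (digv d) (by omega) (digv_bounds hd.1 hd.2).2
                  (by rw [digv_char hd.1 hd.2]; exact hdmem)
              have hed : e ≤ d := hmax e hemem (isDig_iff.mpr ⟨he0, he9⟩)
              have hdeq : d = e := by
                refine digv_inj hd.1 hd.2 he0 he9 ?_
                have h1 : ¬ digv d < digv e := (Iff.not (digit_lt_iff hd.1 he0)).mp (not_lt.mpr hed)
                omega
              subst hdeq
              have hcd : c < e := by
                rw [digit_lt_iff hcd0 he0, hde]
                omega
              dsimp only
              rw [if_pos hcd]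
              -- the rightmost index of e in the suffix is k0 - (i+1)
              have hrest := lastMaxD_lastIdx hlm
              have hglob := lastIdx?_drop hdmem
              rw [hli, hrest] at hglob
              simp only [Option.map_some, Option.some.injEq] at hglob
              have : k0 = i + 1 + k := by omega
              simp [this]
          · -- last occurrence not after i: no hit for this digit, keep scanning
            rw [if_neg (by intro hand; exact hik0 hand.2)]
            rw [hsub]
            refine ihm (by omega) ?_
            intro j' h1 h2
            by_cases hj' : j' = j
            · subst hj'
              intro hmem
              obtain ⟨k', hk'⟩ := lastIdx?_some_of_mem hmem
              have hglob := lastIdx?_drop hmem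
              rw [hli, hk'] at hglob
              simp only [Option.map_some, Option.some.injEq] at hglob
              omega
            · exact hnone j' (by omega) h2

lemma aInner_spec (cs : List Char) (i : Nat) (hi : i < cs.length)
    (hcdig : isDig (cs.getD i ' ') = true) :
    aInner (aDic cs) (i : Int) (digv (cs.getD i ' '))
        (PySem.List.pyRange 10 (digv (cs.getD i ' ')) (-1)) =
      (match lastMaxD (cs.drop (i + 1)) with
       | some (d, k) => if cs.getD i ' ' < d then some ((i + 1 + k : Nat) : Int) else none
       | none => none) := by
  have hc := isDig_iff.mp hcdig
  have hcb := digv_bounds hc.1 hc.2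
  have h10 : (10 : Int) = digv (cs.getD i ' ') + ((10 - digv (cs.getD i ' ')).toNat : Nat) := by
    omega
  rw [h10]
  exact aInner_step cs i hi hc.1 hc.2 _ (by omega) (by intro j h1 h2; exact absurd h2 (by omega))

-- ---------- the outer loop / main induction ----------

lemma main_loop (cs : List Char)
    (hpre : ∀ b, b < cs.length → ¬ isDig (cs.getD b ' ') = true →
      ∃ p, p < b ∧ ∃ q, p < q ∧ q < cs.length ∧ isDig (cs.getD q ' ') = true ∧
        cs.getD p ' ' < cs.getD q ' ') :
    ∀ (t : List Char) (i : Nat), i ≤ cs.length → cs.drop i = t →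
    (∀ p, p < i → ∀ q, p < q → q < cs.length → isDig (cs.getD q ' ') = true →
        ¬ cs.getD p ' ' < cs.getD q ' ') →
    aOuter (aDic cs) cs cs (PySem.List.pyRange (i : Int) (cs.length : Int) 1) =
      (match bFind i t (bScan i t).2 with
       | some (p, j) => (cs.set p (cs.getD j ' ')).set j (cs.getD p ' ')
       | none => cs) := by
  intro t
  induction t with
  | nil =>
      intro i hle ht hni
      have hlen0 : i = cs.length := by
        have h1 : (cs.drop i).length = 0 := by rw [ht]; rfl
        rw [List.length_drop] at h1
        omega
      subst hlen0
      rw [PySem.List.pyRange_one_eq_nil (le_refl _)]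
      rfl
  | cons c rest ih =>
      intro i hle ht hni
      have hlen : i < cs.length := by
        by_contra h
        rw [List.drop_eq_nil_of_le (by omega)] at ht
        cases ht
      have hgetc : cs.getD i ' ' = c := by
        have h0 : (cs.drop i)[0]'(by rw [ht]; simp) = cs[i]'(hlen) := by
          simp [List.getElem_drop]
        rw [List.getD_eq_getElem cs ' ' hlen, ← h0]
        simp [ht]
      have hrest : cs.drop (i + 1) = rest := by
        have h1 : cs.drop (i + 1) = (cs.drop i).drop 1 := by
          rw [List.drop_drop]
        rw [h1, ht]
        simp
      have hdigc : isDig c = true := by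
        by_contra hnd
        obtain ⟨p, hp, q, hpq, hq, hqd, hlt⟩ := hpre i hlen (by rw [hgetc]; exact hnd)
        exact hni p hp q hpq hq hqd hlt
      have hcp := isDig_iff.mp hdigc
      have hcast : ((i : Int) + 1) = ((i + 1 : Nat) : Int) := by push_cast; ring
      have hpg : PySem.List.pyGetD cs (i : Int) ' ' = c := by
        rw [PySem.List.pyGetD_natCast cs i ' ', hgetc]
      have hai := aInner_spec cs i hlen (by rw [hgetc]; exact hdigc)
      rw [hgetc, hrest] at hai
      rw [PySem.List.pyRange_one_cons (by exact_mod_cast hlen)]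
      have hA : aOuter (aDic cs) cs cs ((i : Int) :: PySem.List.pyRange ((i : Int) + 1) (cs.length : Int) 1)
          = (match aInner (aDic cs) (i : Int) (digv c) (PySem.List.pyRange 10 (digv c) (-1)) with
             | some ind => PySem.List.pySetD (PySem.List.pySetD cs (i : Int) (PySem.List.pyGetD cs ind ' ')) ind c
             | none => aOuter (aDic cs) cs cs (PySem.List.pyRange ((i : Int) + 1) (cs.length : Int) 1)) := by
        simp only [aOuter, hpg, (digit_ofChars hcp.1 hcp.2).1]
      rw [hA, hai, bScan_snd_cons]
      simp only [bFind, bScan_fst]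
      have hnext : ∀ hno : (∀ x ∈ rest, isDig x = true → x ≤ c),
          ∀ p, p < i + 1 → ∀ q, p < q → q < cs.length → isDig (cs.getD q ' ') = true →
            ¬ cs.getD p ' ' < cs.getD q ' ' := by
        intro hno p hp q hpq hq hqd hlt
        by_cases hpi : p < i
        · exact hni p hpi q hpq hq hqd hlt
        · have hpeq : p = i := by omega
          subst hpeq
          have hmem : cs.getD q ' ' ∈ rest := by
            rw [← hrest]
            exact getD_mem_drop (by omega) hq
          have hle' : cs.getD q ' ' ≤ c := hno _ hmem hqd
          rw [hgetc] at hlt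
          exact absurd hlt (not_lt.mpr hle')
      rw [show PySem.Int.ofChars? [c] = some (digv c) from (digit_ofChars hcp.1 hcp.2).1]
      rcases hlm : lastMaxD rest with _ | ⟨d, k⟩
      · dsimp only
        rw [hcast]
        refine ih (i + 1) (by omega) hrest ?_
        refine hnext ?_
        intro x hx hxd
        exact absurd hxd ((lastMaxD_none_iff rest).mp hlm x hx)
      · dsimp only [Option.map_some]
        obtain ⟨-, -, hkd, hmax, -⟩ := lastMaxD_spec hlm
        have hdp := isDig_iff.mp hkd
        by_cases hcd : c < d
        · rw [if_pos hcd, if_pos ((digit_lt_iff hcp.1 hdp.1).mp hcd)]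
          dsimp only
          simp only [PySem.List.pyGetD_natCast, PySem.List.pySetD_natCast, hgetc]
        · rw [if_neg hcd, if_neg (fun h => hcd ((digit_lt_iff hcp.1 hdp.1).mpr h))]
          rw [hcast]
          refine ih (i + 1) (by omega) hrest ?_
          refine hnext ?_
          intro x hx hxd
          exact le_trans (hmax x hx hxd) (not_lt.mp hcd)

-- ===== VERDICT (by name: the statement is the Claim_ definition above) =====
theorem largestSwap_spec : Claim_equal_largestSwap := by
  intro s _ hpre
  unfold Spec_largestSwap largestSwap largestSwap_alt
  rw [Pre_largestSwap] at hpre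
  simp only [List.all_eq_true, List.any_eq_true, List.mem_range, Bool.or_eq_true,
    Bool.and_eq_true, decide_eq_true_eq] at hpre
  have hpre' : ∀ b, b < s.toList.length → ¬ isDig (s.toList.getD b ' ') = true →
      ∃ p, p < b ∧ ∃ q, p < q ∧ q < s.toList.length ∧ isDig (s.toList.getD q ' ') = true ∧
        s.toList.getD p ' ' < s.toList.getD q ' ' := by
    intro b hb hnd
    rcases hpre b hb with hd | ⟨p, hp, q, hq, ⟨hpq, hqd⟩, hlt⟩
    · exact absurd hd hnd
    · exact ⟨p, hp, q, hpq, hq, hqd, hlt⟩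
  have h := main_loop s.toList hpre' s.toList 0 (by omega) (by simp) (by intro p hp; omega)
  rw [show ((0 : Nat) : Int) = 0 by simp] at h
  rw [h]
  rcases bFind 0 s.toList (bScan 0 s.toList).2 with _ | ⟨p, j⟩
  · exact String.ofList_toList
  · rfl
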